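-- pv_equiv track=rewrite | github.com/Ktiseos-Nyx/Dataset-Tools | tests/smart_rule_discoverer.py | _classify_json_structure
-- ===== SOURCE A (Python) =====
-- from typing import Dict, List, Set, Any, Optional, Tuple
--
-- def _classify_json_structure(data: Dict[str, Any]) -> str:
--     """Classify the type of JSON structure"""
--     keys = list(data.keys())
--
--     # ComfyUI workflow detection
--     if any(k.isdigit() for k in keys) or "nodes" in keys:
--         return "comfyui_workflow"
--
--     # Configuration file detection
--     if any(k in ["settings", "config", "preferences", "options"] for k in keys):
--         return "configuration"
--
--     # AI parameters detection
--     ai_indicators = ["prompt", "steps", "sampler", "cfg", "seed", "model", "width", "height"]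
--     if any(any(indicator in k.lower() for indicator in ai_indicators) for k in keys):
--         return "ai_parameters"
--
--     # Metadata file detection
--     if any(k in ["metadata", "info", "version", "tool", "app"] for k in keys):
--         return "metadata"
--
--     return "unknown"
-- ===== SOURCE B (Python) =====
-- def _classify_json_structure(data):
--     """Classify the type of JSON structure (single-pass flag accumulation)."""
--     config_names = {"settings", "config", "preferences", "options"}
--     meta_names = {"metadata", "info", "version", "tool", "app"}
--     ai_indicators = ("prompt", "steps", "sampler", "cfg", "seed", "model", "width", "height")
--     is_comfy = is_config = is_ai = is_meta = False
--     for k in data.keys():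
--         if k.isdigit() or k == "nodes":
--             is_comfy = True
--         if k in config_names:
--             is_config = True
--         kl = k.lower()
--         if any(ind in kl for ind in ai_indicators):
--             is_ai = True
--         if k in meta_names:
--             is_meta = True
--     if is_comfy:
--         return "comfyui_workflow"
--     if is_config:
--         return "configuration"
--     if is_ai:
--         return "ai_parameters"
--     if is_meta:
--         return "metadata"
--     return "unknown"
-- ===== Notes on version B (the rewrite author's own statement) =====
-- stated objective: alternative
-- what changed: Four separate short-circuiting any()-scans over the keys are replaced by one pass that accumulates four boolean flags per key, followed by a fixed-priority resolution.
import Mathlib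
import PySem

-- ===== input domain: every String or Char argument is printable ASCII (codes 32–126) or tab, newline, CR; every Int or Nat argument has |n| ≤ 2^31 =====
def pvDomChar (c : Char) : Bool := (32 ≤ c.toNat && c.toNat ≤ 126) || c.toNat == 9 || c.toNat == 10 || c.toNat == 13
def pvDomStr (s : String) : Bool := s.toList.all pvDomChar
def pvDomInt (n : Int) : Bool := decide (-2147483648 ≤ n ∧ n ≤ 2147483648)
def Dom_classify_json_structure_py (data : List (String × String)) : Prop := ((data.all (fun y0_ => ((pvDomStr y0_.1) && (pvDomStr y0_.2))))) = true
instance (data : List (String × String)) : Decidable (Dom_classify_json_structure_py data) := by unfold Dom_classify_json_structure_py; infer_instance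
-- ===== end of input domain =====

-- B replaces A's four short-circuiting scans over the keys with one fold accumulating four flags plus a fixed-priority resolution (alternative decomposition, same cost).


-- ===== PORT A =====
def pvAiIndicators : List String := ["prompt", "steps", "sampler", "cfg", "seed", "model", "width", "height"]

def classify_json_structure_py (data : List (String × String)) : String :=
  let keys : List String := data.map Prod.fst
  if keys.any (fun k => PySem.Str.strIsdigit k) || keys.any (fun k => k == "nodes") then
    "comfyui_workflow"
  else if keys.any (fun k => ["settings", "config", "preferences", "options"].any (fun c => k == c)) then
    "configuration"
  else if keys.any (fun k => pvAiIndicators.any (fun ind => PySem.Str.isIn ind (PySem.Str.lower k))) then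
    "ai_parameters"
  else if keys.any (fun k => ["metadata", "info", "version", "tool", "app"].any (fun c => k == c)) then
    "metadata"
  else
    "unknown"

-- ===== PORT B =====
def classify_json_structure_py_alt (data : List (String × String)) : String :=
  let flags := data.foldl
    (fun (st : Bool × Bool × Bool × Bool) kv =>
      let k := kv.1
      (st.1 || (PySem.Str.strIsdigit k || k == "nodes"),
       st.2.1 || ["settings", "config", "preferences", "options"].any (fun c => k == c),
       st.2.2.1 || pvAiIndicators.any (fun ind => PySem.Str.isIn ind (PySem.Str.lower k)),
       st.2.2.2 || ["metadata", "info", "version", "tool", "app"].any (fun c => k == c)))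
    (false, false, false, false)
  if flags.1 then "comfyui_workflow"
  else if flags.2.1 then "configuration"
  else if flags.2.2.1 then "ai_parameters"
  else if flags.2.2.2 then "metadata"
  else "unknown"

-- ===== PRECONDITION & SPEC =====
def Spec_classify_json_structure_py (data : List (String × String)) (out : String) : Prop := out = classify_json_structure_py_alt data
instance (data : List (String × String)) (out : String) : Decidable (Spec_classify_json_structure_py data out) := by unfold Spec_classify_json_structure_py; infer_instance

-- ===== CLAIM (what is proved, stated in full; the proofs are below) =====
def Claim_equal_classify_json_structure_py : Prop := ∀ (data : List (String × String)), Dom_classify_json_structure_py data → Spec_classify_json_structure_py data (classify_json_structure_py data)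

-- ===== LEMMAS AND PROOFS =====

-- B's fold computes the four disjunctions flag-wise.
theorem pv_foldl_or4 (p1 p2 p3 p4 : String × String → Bool) (xs : List (String × String))
    (b1 b2 b3 b4 : Bool) :
    xs.foldl (fun (st : Bool × Bool × Bool × Bool) kv =>
        (st.1 || p1 kv, st.2.1 || p2 kv, st.2.2.1 || p3 kv, st.2.2.2 || p4 kv))
      (b1, b2, b3, b4)
    = (b1 || xs.any p1, b2 || xs.any p2, b3 || xs.any p3, b4 || xs.any p4) := by
  induction xs generalizing b1 b2 b3 b4 with
  | nil => simp
  | cons h t ih => simp [List.foldl, ih, Bool.or_assoc]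

-- A's two first-scan disjuncts fuse into B's per-key disjunction.
theorem pv_any_or (p q : String × String → Bool) (xs : List (String × String)) :
    xs.any (fun kv => p kv || q kv) = (xs.any p || xs.any q) := by
  induction xs with
  | nil => rfl
  | cons h t ih => cases hp : p h <;> cases hq : q h <;> simp [List.any, ih, hp, hq]

-- ===== VERDICT (by name: the statement is the Claim_ definition above) =====
theorem classify_json_structure_py_spec : Claim_equal_classify_json_structure_py := by
  intro data _
  unfold Spec_classify_json_structure_py classify_json_structure_py classify_json_structure_py_alt
  simp only [pv_foldl_or4, Bool.false_or, List.any_map, Function.comp_def, pv_any_or]
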